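-- pv_equiv track=rewrite | github.com/iccccc-io/xyyz-new | tools/gen_docs.py | strip_leading_comments_and_ws
-- ===== SOURCE A (Python) =====
-- def skip_comment(src: str, i: int) -> int:
--     if src.startswith("//", i):
--         end = src.find("\n", i)
--         return len(src) if end == -1 else end + 1
--     if src.startswith("/*", i):
--         end = src.find("*/", i + 2)
--         return len(src) if end == -1 else end + 2
--     return i + 1
--
-- def strip_leading_comments_and_ws(text: str) -> str:
--     i = 0
--     while i < len(text):
--         while i < len(text) and text[i].isspace():
--             i += 1
--         if text.startswith("//", i) or text.startswith("/*", i):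
--             i = skip_comment(text, i)
--             continue
--         break
--     return text[i:]
-- ===== SOURCE B (Python) =====
-- def strip_leading_comments_and_ws(text: str) -> str:
--     # Single left-to-right scan with an explicit 3-state machine
--     # (0 = code/whitespace, 1 = inside // comment, 2 = inside /* comment);
--     # no substring searches, just one char of lookahead.
--     n = len(text)
--     i = 0
--     state = 0
--     while i < n:
--         c = text[i]
--         if state == 0:
--             if c.isspace():
--                 i += 1
--             elif c == "/" and i + 1 < n and text[i + 1] == "/":
--                 i += 2
--                 state = 1
--             elif c == "/" and i + 1 < n and text[i + 1] == "*":
--                 i += 2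
--                 state = 2
--             else:
--                 break
--         elif state == 1:
--             i += 1
--             if c == "\n":
--                 state = 0
--         else:
--             if c == "*" and i + 1 < n and text[i + 1] == "/":
--                 i += 2
--                 state = 0
--             else:
--                 i += 1
--     return text[i:]
-- ===== Notes on version B (the rewrite author's own statement) =====
-- stated objective: alternative
-- what changed: Replaced A's nested loops with substring searches (str.startswith at an index, str.find for the comment terminator) by a single left-to-right scan driven by an explicit 3-state machine (code / line comment / block comment) using one character of lookahead.
import Mathlib
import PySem

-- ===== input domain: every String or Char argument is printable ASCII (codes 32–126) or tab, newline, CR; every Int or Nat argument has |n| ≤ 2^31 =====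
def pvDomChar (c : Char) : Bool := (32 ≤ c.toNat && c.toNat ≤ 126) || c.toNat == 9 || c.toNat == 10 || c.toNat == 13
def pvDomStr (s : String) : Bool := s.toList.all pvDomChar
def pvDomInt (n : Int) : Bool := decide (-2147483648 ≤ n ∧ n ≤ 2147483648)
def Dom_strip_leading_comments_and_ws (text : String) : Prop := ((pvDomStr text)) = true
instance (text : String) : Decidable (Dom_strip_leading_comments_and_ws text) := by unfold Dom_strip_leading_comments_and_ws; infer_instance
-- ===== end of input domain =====

-- B replaces A's startswith/find substring scans by a single 3-state one-pass scanner; proved equal on all inputs.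

-- ===== PORT A =====

-- skip_comment(src, i): Python's src.find(sub, i) is PySem.Chars.findFrom, src.startswith(p, i) is startswith on drop i (i ≥ 0)
def pvASkipComment (l : List Char) (i : Nat) : Nat :=
  if PySem.Chars.startswith (l.drop i) ['/', '/'] then
    if PySem.Chars.findFrom l ['\n'] (i : Int) = -1 then l.length
    else (PySem.Chars.findFrom l ['\n'] (i : Int) + 1).toNat
  else if PySem.Chars.startswith (l.drop i) ['/', '*'] then
    if PySem.Chars.findFrom l ['*', '/'] ((i : Int) + 2) = -1 then l.length
    else (PySem.Chars.findFrom l ['*', '/'] ((i : Int) + 2) + 2).toNat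
  else i + 1

-- inner `while i < len(text) and text[i].isspace(): i += 1`
def pvASkipWS (l : List Char) (i : Nat) : Nat :=
  if h : i < l.length then
    if PySem.Chars.isspace l[i] then pvASkipWS l (i + 1) else i
  else i
termination_by l.length - i

theorem pvASkipWS_ge (l : List Char) (i : Nat) : i ≤ pvASkipWS l i := by
  unfold pvASkipWS
  split
  · split
    · have := pvASkipWS_ge l (i + 1); omega
    · omega
  · omega
termination_by l.length - i

theorem pvASkipComment_gt (l : List Char) (i : Nat) (hi : i < l.length) :
    i < pvASkipComment l i := by
  unfold pvASkipComment
  by_cases h1 : PySem.Chars.startswith (l.drop i) ['/', '/'] = true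
  · rw [if_pos h1]
    by_cases he : PySem.Chars.findFrom l ['\n'] (i : Int) = -1
    · rw [if_pos he]; omega
    · rw [if_neg he]
      have hsp := PySem.Chars.findFrom_natCast_spec l ['\n'] i (by omega) he
      omega
  · rw [if_neg h1]
    by_cases h2 : PySem.Chars.startswith (l.drop i) ['/', '*'] = true
    · rw [if_pos h2]
      have hpre := (PySem.Chars.startswith_iff _ _).mp h2
      have hlen : i + 2 ≤ l.length := by
        have := hpre.length_le; simp at this; omega
      have hcast : ((i : Int) + 2) = ((i + 2 : Nat) : Int) := by push_cast; ring
      rw [hcast]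
      by_cases he : PySem.Chars.findFrom l ['*', '/'] ((i + 2 : Nat) : Int) = -1
      · rw [if_pos he]; omega
      · rw [if_neg he]
        have hsp := PySem.Chars.findFrom_natCast_spec l ['*', '/'] (i + 2) hlen he
        omega
    · rw [if_neg h2]; omega

-- outer `while i < len(text): …` (i after the inner ws loop is pvASkipWS l i)
def pvALoop (l : List Char) (i : Nat) : Nat :=
  if h : i < l.length then
    if PySem.Chars.startswith (l.drop (pvASkipWS l i)) ['/', '/']
        || PySem.Chars.startswith (l.drop (pvASkipWS l i)) ['/', '*'] then
      pvALoop l (pvASkipComment l (pvASkipWS l i))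
    else pvASkipWS l i
  else i
termination_by l.length - i
decreasing_by
  have h1 := pvASkipWS_ge l i
  rename_i hsw
  by_cases hj : pvASkipWS l i < l.length
  · have := pvASkipComment_gt l (pvASkipWS l i) hj; omega
  · exfalso
    have hnil : l.drop (pvASkipWS l i) = [] := List.drop_eq_nil_of_le (by omega)
    rw [hnil] at hsw
    simp [PySem.Chars.startswith] at hsw

def strip_leading_comments_and_ws (text : String) : String :=
  String.ofList ((text.toList).drop (pvALoop text.toList 0))

-- ===== PORT B =====

-- the 3-state scanner: state 0 = code/ws, 1 = inside `//`, 2 = inside `/*`; one char of lookahead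
def pvBLoop (l : List Char) (i : Nat) (state : Nat) : Nat :=
  if h : i < l.length then
    if state = 0 then
      if PySem.Chars.isspace l[i] then pvBLoop l (i + 1) 0
      else if l[i] = '/' ∧ l[i + 1]? = some '/' then pvBLoop l (i + 2) 1
      else if l[i] = '/' ∧ l[i + 1]? = some '*' then pvBLoop l (i + 2) 2
      else i
    else if state = 1 then
      if l[i] = '\n' then pvBLoop l (i + 1) 0 else pvBLoop l (i + 1) 1
    else
      if l[i] = '*' ∧ l[i + 1]? = some '/' then pvBLoop l (i + 2) 0 else pvBLoop l (i + 1) 2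
  else i
termination_by l.length - i

def strip_leading_comments_and_ws_alt (text : String) : String :=
  String.ofList ((text.toList).drop (pvBLoop text.toList 0 0))

-- ===== PRECONDITION & SPEC =====
def Spec_strip_leading_comments_and_ws (text : String) (out : String) : Prop := out = strip_leading_comments_and_ws_alt text
instance (text : String) (out : String) : Decidable (Spec_strip_leading_comments_and_ws text out) := by unfold Spec_strip_leading_comments_and_ws; infer_instance

-- ===== CLAIM (what is proved, stated in full; the proofs are below) =====
def Claim_equal_strip_leading_comments_and_ws : Prop := ∀ (text : String), Dom_strip_leading_comments_and_ws text → Spec_strip_leading_comments_and_ws text (strip_leading_comments_and_ws text)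

-- ===== LEMMAS AND PROOFS =====

theorem pv_prefix2 (l : List Char) (i : Nat) (a b : Char) :
    ([a, b] <+: l.drop i) ↔ (l[i]? = some a ∧ l[i + 1]? = some b) := by
  have h0 : (l.drop i)[0]? = l[i]? := by simp [List.getElem?_drop]
  have h1 : (l.drop i)[1]? = l[i + 1]? := by simp [List.getElem?_drop]
  rw [← h0, ← h1]
  match hd : l.drop i with
  | [] => simp
  | [x] => simp [List.cons_prefix_iff]
  | x :: y :: t =>
    simp only [List.cons_prefix_iff, List.getElem?_cons_zero, List.getElem?_cons_succ,
      Option.some.injEq]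
    constructor
    · rintro ⟨t', ht', u, hu, -⟩
      simp_all
    · rintro ⟨ha, hb⟩
      exact ⟨y :: t, by rw [ha], t, by rw [hb], List.nil_prefix⟩

theorem pv_prefix1 (l : List Char) (i : Nat) (a : Char) :
    ([a] <+: l.drop i) ↔ l[i]? = some a := by
  have h0 : (l.drop i)[0]? = l[i]? := by simp [List.getElem?_drop]
  rw [← h0]
  match hd : l.drop i with
  | [] => simp
  | x :: t =>
    simp only [List.cons_prefix_iff, List.getElem?_cons_zero, Option.some.injEq]
    constructor
    · rintro ⟨t', ht', -⟩; simp_all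
    · intro h; exact ⟨t, by rw [h], List.nil_prefix⟩

theorem pv_infix_drop_iff (l sub : List Char) (k : Nat) :
    (sub <:+: l.drop k) ↔ ∃ m, k ≤ m ∧ sub <+: l.drop m := by
  rw [← PySem.Chars.isIn_iff_infix, ← PySem.Chars.exists_prefix_drop_iff_isIn]
  constructor
  · rintro ⟨j, hj⟩
    exact ⟨k + j, by omega, by rwa [List.drop_drop] at hj⟩
  · rintro ⟨m, hm, hp⟩
    exact ⟨m - k, by rw [List.drop_drop]; rwa [Nat.add_sub_cancel' hm]⟩

-- state 1 with no newline ahead runs to the end of the string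
theorem pvB_line_none (l : List Char) :
    ∀ j, j ≤ l.length → (∀ m, j ≤ m → ¬ (['\n'] <+: l.drop m)) → pvBLoop l j 1 = l.length := by
  intro j hj hno
  by_cases h : j < l.length
  · have hne : ¬ (l[j] = '\n') := by
      intro hc
      exact hno j le_rfl ((pv_prefix1 l j '\n').mpr (by simp [List.getElem?_eq_getElem h, hc]))
    have step : pvBLoop l j 1 = pvBLoop l (j + 1) 1 := by
      conv_lhs => unfold pvBLoop
      simp [h, hne]
    rw [step]
    exact pvB_line_none l (j + 1) (by omega) (fun m hm => hno m (by omega))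
  · unfold pvBLoop
    rw [dif_neg h]
    omega
termination_by j => l.length - j

-- state 1 stops right after the first newline (at position e)
theorem pvB_line_some (l : List Char) (e : Nat) (hpre : ['\n'] <+: l.drop e) :
    ∀ j, j ≤ e → (∀ m, j ≤ m → m < e → ¬ (['\n'] <+: l.drop m)) →
      pvBLoop l j 1 = pvBLoop l (e + 1) 0 := by
  intro j hj hmin
  have hge : l[e]? = some '\n' := (pv_prefix1 l e '\n').mp hpre
  obtain ⟨hlt, hv⟩ := List.getElem?_eq_some_iff.mp hge
  rcases Nat.eq_or_lt_of_le hj with heq | hlt2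
  · subst heq
    conv_lhs => unfold pvBLoop
    simp [hlt, hv]
  · have step : pvBLoop l j 1 = pvBLoop l (j + 1) 1 := by
      have hne : ¬ (l[j] = '\n') := by
        intro hc
        exact hmin j le_rfl hlt2
          ((pv_prefix1 l j '\n').mpr (by simp [List.getElem?_eq_getElem (by omega : j < l.length), hc]))
      conv_lhs => unfold pvBLoop
      simp [show j < l.length by omega, hne]
    rw [step]
    exact pvB_line_some l e hpre (j + 1) (by omega) (fun m hm1 hm2 => hmin m (by omega) hm2)
termination_by j => e - j

-- state 2 with no "*/" ahead runs to the end of the string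
theorem pvB_block_none (l : List Char) :
    ∀ j, j ≤ l.length → (∀ m, j ≤ m → ¬ (['*', '/'] <+: l.drop m)) → pvBLoop l j 2 = l.length := by
  intro j hj hno
  by_cases h : j < l.length
  · have hne : ¬ (l[j] = '*' ∧ l[j + 1]? = some '/') := by
      rintro ⟨h1, h2⟩
      exact hno j le_rfl ((pv_prefix2 l j '*' '/').mpr ⟨by simp [List.getElem?_eq_getElem h, h1], h2⟩)
    have step : pvBLoop l j 2 = pvBLoop l (j + 1) 2 := by
      conv_lhs => unfold pvBLoop
      simp [h, hne]
    rw [step]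
    exact pvB_block_none l (j + 1) (by omega) (fun m hm => hno m (by omega))
  · unfold pvBLoop
    rw [dif_neg h]
    omega
termination_by j => l.length - j

-- state 2 stops right after the first "*/" (starting at position e)
theorem pvB_block_some (l : List Char) (e : Nat) (hpre : ['*', '/'] <+: l.drop e) :
    ∀ j, j ≤ e → (∀ m, j ≤ m → m < e → ¬ (['*', '/'] <+: l.drop m)) →
      pvBLoop l j 2 = pvBLoop l (e + 2) 0 := by
  intro j hj hmin
  obtain ⟨h1, h2⟩ := (pv_prefix2 l e '*' '/').mp hpre
  obtain ⟨hlt, hv⟩ := List.getElem?_eq_some_iff.mp h1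
  rcases Nat.eq_or_lt_of_le hj with heq | hlt2
  · subst heq
    conv_lhs => unfold pvBLoop
    simp [hlt, hv, h2]
  · have step : pvBLoop l j 2 = pvBLoop l (j + 1) 2 := by
      have hne : ¬ (l[j] = '*' ∧ l[j + 1]? = some '/') := by
        rintro ⟨ha, hb⟩
        exact hmin j le_rfl hlt2
          ((pv_prefix2 l j '*' '/').mpr ⟨by simp [List.getElem?_eq_getElem (by omega : j < l.length), ha], hb⟩)
      conv_lhs => unfold pvBLoop
      simp [show j < l.length by omega, hne]
    rw [step]
    exact pvB_block_some l e hpre (j + 1) (by omega) (fun m hm1 hm2 => hmin m (by omega) hm2)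
termination_by j => e - j

-- skipping one leading space commutes with A's outer loop
theorem pvALoop_space (l : List Char) (i : Nat) (hi : i < l.length)
    (hs : PySem.Chars.isspace l[i]) : pvALoop l i = pvALoop l (i + 1) := by
  have hws : pvASkipWS l i = pvASkipWS l (i + 1) := by
    conv_lhs => unfold pvASkipWS
    rw [dif_pos hi, if_pos hs]
  by_cases h1 : i + 1 < l.length
  · conv_lhs => unfold pvALoop
    conv_rhs => unfold pvALoop
    rw [dif_pos hi, dif_pos h1, hws]
  · have hws1 : pvASkipWS l (i + 1) = i + 1 := by
      unfold pvASkipWS; rw [dif_neg (by omega)]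
    have hdrop : l.drop (i + 1) = [] := List.drop_eq_nil_of_le (by omega)
    conv_lhs => unfold pvALoop
    conv_rhs => unfold pvALoop
    rw [dif_pos hi, dif_neg (by omega : ¬ (i + 1 < l.length)), hws, hws1, hdrop]
    simp [PySem.Chars.startswith]

theorem pv_main (l : List Char) : ∀ fuel i, l.length - i ≤ fuel → pvALoop l i = pvBLoop l i 0 := by
  intro fuel
  induction fuel with
  | zero =>
    intro i hfi
    unfold pvALoop pvBLoop
    rw [dif_neg (by omega), dif_neg (by omega)]
  | succ f ih =>
    intro i hfi
    by_cases hi : i < l.length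
    · by_cases hs : PySem.Chars.isspace l[i]
      · rw [pvALoop_space l i hi hs, ih (i + 1) (by omega)]
        conv_rhs => unfold pvBLoop
        simp [hi, hs]
      · have hws : pvASkipWS l i = i := by
          unfold pvASkipWS; rw [dif_pos hi, if_neg hs]
        have hgl : l[i]? = some l[i] := List.getElem?_eq_getElem hi
        by_cases hsl : l[i] = '/' ∧ l[i + 1]? = some '/'
        · -- line comment
          have hsw : PySem.Chars.startswith (l.drop i) ['/', '/'] = true := by
            rw [PySem.Chars.startswith_iff, pv_prefix2]
            exact ⟨by rw [hgl, hsl.1], hsl.2⟩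
          have hi2 : i + 2 ≤ l.length := by
            rcases List.getElem?_eq_some_iff.mp hsl.2 with ⟨h, -⟩; omega
          have hA : pvALoop l i = pvALoop l (pvASkipComment l i) := by
            conv_lhs => unfold pvALoop
            rw [dif_pos hi, hws, hsw]
            simp
          have hB : pvBLoop l i 0 = pvBLoop l (i + 2) 1 := by
            conv_lhs => unfold pvBLoop
            simp [hi, hsl, (by decide : PySem.Chars.isspace '/' = false)]
          rw [hA, hB]
          unfold pvASkipComment
          rw [if_pos hsw]
          by_cases he : PySem.Chars.findFrom l ['\n'] (i : Int) = -1
          · rw [if_pos he]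
            have hno := (PySem.Chars.findFrom_natCast_eq_neg_one_iff l ['\n'] i (by omega)).mp he
            rw [pv_infix_drop_iff] at hno
            push Not at hno
            rw [pvB_line_none l (i + 2) hi2 (fun m hm => hno m (by omega))]
            unfold pvALoop
            rw [dif_neg (by omega)]
          · rw [if_neg he]
            have hsp := PySem.Chars.findFrom_natCast_spec l ['\n'] i (by omega) he
            set e := PySem.Chars.findFrom l ['\n'] (i : Int) with hedef
            have hpre : ['\n'] <+: l.drop e.toNat := hsp.2.1
            have hge2 : i + 2 ≤ e.toNat := by
              have hne1 : e.toNat ≠ i := by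
                intro hc
                have := (pv_prefix1 l e.toNat '\n').mp hpre
                rw [hc, hgl] at this
                simp [hsl.1] at this
              have hne2 : e.toNat ≠ i + 1 := by
                intro hc
                have := (pv_prefix1 l e.toNat '\n').mp hpre
                rw [hc, hsl.2] at this
                simp at this
              omega
            rw [pvB_line_some l e.toNat hpre (i + 2) hge2
                  (fun m hm1 hm2 => hsp.2.2 m (by omega) hm2)]
            have htn : (e + 1).toNat = e.toNat + 1 := by omega
            rw [htn]
            exact ih (e.toNat + 1) (by omega)
        · by_cases hbl : l[i] = '/' ∧ l[i + 1]? = some '*'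
          · -- block comment
            have hsw2 : PySem.Chars.startswith (l.drop i) ['/', '*'] = true := by
              rw [PySem.Chars.startswith_iff, pv_prefix2]
              exact ⟨by rw [hgl, hbl.1], hbl.2⟩
            have hsw1 : PySem.Chars.startswith (l.drop i) ['/', '/'] = false := by
              rw [Bool.eq_false_iff]
              intro hc
              rw [PySem.Chars.startswith_iff, pv_prefix2] at hc
              exact hsl ⟨by rw [hgl] at hc; simpa using hc.1, hc.2⟩
            have hi2 : i + 2 ≤ l.length := by
              rcases List.getElem?_eq_some_iff.mp hbl.2 with ⟨h, -⟩; omega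
            have hA : pvALoop l i = pvALoop l (pvASkipComment l i) := by
              conv_lhs => unfold pvALoop
              rw [dif_pos hi, hws, hsw1, hsw2]
              simp
            have hB : pvBLoop l i 0 = pvBLoop l (i + 2) 2 := by
              conv_lhs => unfold pvBLoop
              simp [hi, hbl, (by decide : PySem.Chars.isspace '/' = false)]
            rw [hA, hB]
            unfold pvASkipComment
            rw [if_neg (by simp [hsw1]), if_pos hsw2]
            have hcast : ((i : Int) + 2) = ((i + 2 : Nat) : Int) := by push_cast; ring
            rw [hcast]
            by_cases he : PySem.Chars.findFrom l ['*', '/'] ((i + 2 : Nat) : Int) = -1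
            · rw [if_pos he]
              have hno := (PySem.Chars.findFrom_natCast_eq_neg_one_iff l ['*', '/'] (i + 2) hi2).mp he
              rw [pv_infix_drop_iff] at hno
              push Not at hno
              rw [pvB_block_none l (i + 2) hi2 (fun m hm => hno m hm)]
              unfold pvALoop
              rw [dif_neg (by omega)]
            · rw [if_neg he]
              have hsp := PySem.Chars.findFrom_natCast_spec l ['*', '/'] (i + 2) hi2 he
              set e := PySem.Chars.findFrom l ['*', '/'] ((i + 2 : Nat) : Int) with hedef
              have hpre : ['*', '/'] <+: l.drop e.toNat := hsp.2.1
              rw [pvB_block_some l e.toNat hpre (i + 2) (by omega)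
                    (fun m hm1 hm2 => hsp.2.2 m hm1 hm2)]
              have htn : (e + 2).toNat = e.toNat + 2 := by omega
              rw [htn]
              exact ih (e.toNat + 2) (by omega)
          · -- plain code character: both stop at i
            have hsw1 : PySem.Chars.startswith (l.drop i) ['/', '/'] = false := by
              rw [Bool.eq_false_iff]
              intro hc
              rw [PySem.Chars.startswith_iff, pv_prefix2] at hc
              exact hsl ⟨by rw [hgl] at hc; simpa using hc.1, hc.2⟩
            have hsw2 : PySem.Chars.startswith (l.drop i) ['/', '*'] = false := by
              rw [Bool.eq_false_iff]
              intro hc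
              rw [PySem.Chars.startswith_iff, pv_prefix2] at hc
              exact hbl ⟨by rw [hgl] at hc; simpa using hc.1, hc.2⟩
            have hA : pvALoop l i = i := by
              conv_lhs => unfold pvALoop
              rw [dif_pos hi, hws, hsw1, hsw2]
              simp
            have hB : pvBLoop l i 0 = i := by
              conv_lhs => unfold pvBLoop
              simp [hi, hs, hsl, hbl]
            rw [hA, hB]
    · unfold pvALoop pvBLoop
      rw [dif_neg hi, dif_neg hi]

-- ===== VERDICT (by name: the statement is the Claim_ definition above) =====
theorem strip_leading_comments_and_ws_spec : Claim_equal_strip_leading_comments_and_ws := by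
  intro text _
  unfold Spec_strip_leading_comments_and_ws strip_leading_comments_and_ws strip_leading_comments_and_ws_alt
  rw [pv_main text.toList text.toList.length 0 (by omega)]
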